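-- pv_equiv track=rewrite | github.com/thom-heinrich/twinr | src/twinr/memory/longterm/retrieval/unified_plan.py | _query_attribute_families
-- ===== SOURCE A (Python) =====
-- from collections.abc import Iterable, Mapping, Sequence
--
-- _QUERY_ATTRIBUTE_FAMILY_TOKENS: dict[str, frozenset[str]] = {
--     "email": frozenset({"email", "mail"}),
--     "phone": frozenset({"phone", "telefon", "telefonnummer", "rufnummer", "number", "nummer"}),
--     "address": frozenset({"address", "adresse"}),
-- }
--
-- def _query_attribute_families(query_terms: Sequence[str]) -> tuple[str, ...]:
--     """Infer explicit contact-attribute families from the normalized query terms.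
--
--     Exact graph contact lookups often match only the owning person node while
--     the attribute type itself is expressed only in the user query text, for
--     example "How can I reach Anna Becker by email?" or "Wie lautet Anna Beckers
--     E-Mail-Adresse?". When that happens, the unified planner still needs a
--     strict entity+attribute precision gate so unrelated durable/continuity
--     support cannot leak into a graph-only answer.
--     """
--
--     query_term_set = {term for term in query_terms if term}
--     families: list[str] = []
--     if query_term_set & _QUERY_ATTRIBUTE_FAMILY_TOKENS["email"]:
--         families.append("email")
--     if query_term_set & _QUERY_ATTRIBUTE_FAMILY_TOKENS["phone"]:
--         families.append("phone")
--     if "email" not in families and query_term_set & _QUERY_ATTRIBUTE_FAMILY_TOKENS["address"]: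
--         families.append("address")
--     return tuple(families)
-- ===== SOURCE B (Python) =====
-- # B: branch-free bitmask accumulation + constant result table; the precedence
-- # logic (address suppressed by email) is encoded in the 8-entry table, not in code.
-- _TOKEN_BIT = {
--     "email": 1, "mail": 1,
--     "phone": 2, "telefon": 2, "telefonnummer": 2, "rufnummer": 2,
--     "number": 2, "nummer": 2,
--     "address": 4, "adresse": 4,
-- }
--
-- _FAMILIES_BY_MASK = (
--     (),                   # 0b000
--     ("email",),           # 0b001
--     ("phone",),           # 0b010
--     ("email", "phone"),   # 0b011
--     ("address",),         # 0b100
--     ("email",),           # 0b101  address suppressed by email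
--     ("phone", "address"), # 0b110
--     ("email", "phone"),   # 0b111  address suppressed by email
-- )
--
-- def _query_attribute_families(query_terms):
--     mask = 0
--     for term in query_terms:
--         mask |= _TOKEN_BIT.get(term, 0)
--     return _FAMILIES_BY_MASK[mask]
-- ===== Notes on version B (the rewrite author's own statement) =====
-- stated objective: alternative
-- what changed: Replaces A's set comprehension, three frozenset intersections and conditional list appends with a branch-free OR-accumulated 3-bit mask (constant token-to-bit dict) and a constant 8-entry lookup table that encodes the output order and the email-suppresses-address precedence as data.
import Mathlib
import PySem

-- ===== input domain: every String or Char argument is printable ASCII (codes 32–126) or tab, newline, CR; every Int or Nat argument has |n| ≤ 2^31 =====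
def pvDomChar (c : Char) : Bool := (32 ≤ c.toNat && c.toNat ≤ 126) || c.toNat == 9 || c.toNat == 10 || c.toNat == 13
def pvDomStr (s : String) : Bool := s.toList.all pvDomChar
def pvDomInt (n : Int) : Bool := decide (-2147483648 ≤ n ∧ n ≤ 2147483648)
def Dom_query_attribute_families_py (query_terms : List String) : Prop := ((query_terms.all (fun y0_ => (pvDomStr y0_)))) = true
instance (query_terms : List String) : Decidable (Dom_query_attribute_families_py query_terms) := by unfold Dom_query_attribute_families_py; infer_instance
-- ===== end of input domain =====

-- B replaces A's set comprehension + three frozenset intersections + conditional appends with a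
-- branch-free OR-accumulated 3-bit mask and a constant 8-entry lookup table (alternative, same cost).


-- ===== PORT A =====
-- _QUERY_ATTRIBUTE_FAMILY_TOKENS (the three frozensets, as lists of their distinct elements)
def pvEmailTokens : List String := ["email", "mail"]
def pvPhoneTokens : List String := ["phone", "telefon", "telefonnummer", "rufnummer", "number", "nummer"]
def pvAddressTokens : List String := ["address", "adresse"]

def query_attribute_families_py (query_terms : List String) : List String :=
  -- query_term_set = {term for term in query_terms if term}
  let query_term_set : PySem.Set String := PySem.Set.ofList (query_terms.filter (fun t => t ≠ ""))
  -- truthiness of 'query_term_set & tokens' = the intersection is nonempty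
  let families : List String :=
    if PySem.Set.inter query_term_set pvEmailTokens ≠ [] then ["email"] else []
  let families :=
    if PySem.Set.inter query_term_set pvPhoneTokens ≠ [] then families ++ ["phone"] else families
  let families :=
    if "email" ∉ families ∧ PySem.Set.inter query_term_set pvAddressTokens ≠ [] then
      families ++ ["address"]
    else families
  families

-- ===== PORT B =====
-- _TOKEN_BIT: constant token → bit dict (values are small nonnegative Python ints, ported as Nat)
def pvTokenBit : PySem.Dict String Nat :=
  PySem.Dict.ofList
    [("email", 1), ("mail", 1),
     ("phone", 2), ("telefon", 2), ("telefonnummer", 2),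
     ("rufnummer", 2), ("number", 2), ("nummer", 2),
     ("address", 4), ("adresse", 4)]

-- _FAMILIES_BY_MASK: the constant 8-entry result table
def pvFamiliesByMask : List (List String) :=
  [[], ["email"], ["phone"], ["email", "phone"],
   ["address"], ["email"], ["phone", "address"], ["email", "phone"]]

def query_attribute_families_py_alt (query_terms : List String) : List String :=
  -- mask = 0; for term: mask |= _TOKEN_BIT.get(term, 0)
  let mask : Nat := query_terms.foldl (fun m t => m ||| PySem.Dict.getD pvTokenBit t 0) 0
  -- return _FAMILIES_BY_MASK[mask]   (mask < 8 always, so the index is in range)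
  pvFamiliesByMask.getD mask []

-- ===== PRECONDITION & SPEC =====
def Spec_query_attribute_families_py (query_terms : List String) (out : List String) : Prop := out = query_attribute_families_py_alt query_terms
instance (query_terms : List String) (out : List String) : Decidable (Spec_query_attribute_families_py query_terms out) := by unfold Spec_query_attribute_families_py; infer_instance

-- ===== CLAIM (what is proved, stated in full; the proofs are below) =====
def Claim_equal_query_attribute_families_py : Prop := ∀ (query_terms : List String), Dom_query_attribute_families_py query_terms → Spec_query_attribute_families_py query_terms (query_attribute_families_py query_terms)

-- ===== LEMMAS AND PROOFS =====

-- B's per-term bit, named for the lemmas below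
def pvBit (t : String) : Nat := PySem.Dict.getD pvTokenBit t 0

theorem pvTokenBit_mk : pvTokenBit = PySem.Dict.mk
    [("email", 1), ("mail", 1),
     ("phone", 2), ("telefon", 2), ("telefonnummer", 2),
     ("rufnummer", 2), ("number", 2), ("nummer", 2),
     ("address", 4), ("adresse", 4)] := by decide

theorem pv_bit_lt (t : String) : pvBit t < 8 := by
  unfold pvBit
  rw [pvTokenBit_mk]
  simp only [PySem.Dict.getD, PySem.Dict.get?, List.find?_cons, List.find?_nil]
  (repeat' split) <;> simp_all

theorem pv_bit_testBit0 (t : String) :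
    (pvBit t).testBit 0 = decide (t ∈ pvEmailTokens) := by
  unfold pvBit
  rw [pvTokenBit_mk]
  simp only [pvEmailTokens, List.mem_cons, List.not_mem_nil, or_false,
    PySem.Dict.getD, PySem.Dict.get?, List.find?_cons, List.find?_nil]
  (repeat' split) <;> simp_all <;> aesop

theorem pv_bit_testBit1 (t : String) :
    (pvBit t).testBit 1 = decide (t ∈ pvPhoneTokens) := by
  unfold pvBit
  rw [pvTokenBit_mk]
  simp only [pvPhoneTokens, List.mem_cons, List.not_mem_nil, or_false,
    PySem.Dict.getD, PySem.Dict.get?, List.find?_cons, List.find?_nil]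
  (repeat' split) <;> simp_all <;> aesop

theorem pv_bit_testBit2 (t : String) :
    (pvBit t).testBit 2 = decide (t ∈ pvAddressTokens) := by
  unfold pvBit
  rw [pvTokenBit_mk]
  simp only [pvAddressTokens, List.mem_cons, List.not_mem_nil, or_false,
    PySem.Dict.getD, PySem.Dict.get?, List.find?_cons, List.find?_nil]
  (repeat' split) <;> simp_all <;> aesop

-- the folded mask stays below 8
theorem pv_mask_lt (qs : List String) (a : Nat) (ha : a < 8) :
    qs.foldl (fun m t => m ||| pvBit t) a < 8 := by
  induction qs generalizing a with
  | nil => exact ha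
  | cons h tl ih =>
    exact ih _ (Nat.or_lt_two_pow (n := 3) ha (pv_bit_lt h))

-- each bit of the folded mask = "some term carries that bit"
theorem pv_mask_testBit (qs : List String) (a : Nat) (i : Nat) :
    (qs.foldl (fun m t => m ||| pvBit t) a).testBit i
      = (a.testBit i || qs.any (fun t => (pvBit t).testBit i)) := by
  induction qs generalizing a with
  | nil => simp
  | cons h tl ih =>
    simp [List.foldl_cons, ih, Nat.testBit_or, Bool.or_assoc]

-- a mask < 8 is determined by its three low bits
theorem pv_mask_eq (m : Nat) (hlt : m < 8) (b0 b1 b2 : Bool)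
    (h0 : m.testBit 0 = b0) (h1 : m.testBit 1 = b1) (h2 : m.testBit 2 = b2) :
    m = (cond b0 1 0) + (cond b1 2 0) + (cond b2 4 0) := by
  cases b0 <;> cases b1 <;> cases b2 <;> interval_cases m <;>
    revert h0 h1 h2 <;> decide

-- a Bool known up to an iff equals the decide of the proposition
theorem pv_testBit_decide {b : Bool} {P : Prop} [Decidable P] (h : b = true ↔ P) :
    b = decide P := by
  cases b <;> simp_all

-- A's intersection-truthiness, characterised by existence of a matching term
theorem pv_inter_ne (qs : List String) (toks : List String) (hne : "" ∉ toks) :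
    PySem.Set.inter (PySem.Set.ofList (qs.filter (fun t => t ≠ ""))) toks ≠ []
    ↔ ∃ t ∈ qs, t ∈ toks := by
  rw [← List.isEmpty_eq_false_iff, List.isEmpty_eq_false_iff_exists_mem]
  constructor
  · rintro ⟨x, hx⟩
    rcases (PySem.Set.mem_inter _ _ _).1 hx with ⟨hs, ht⟩
    rcases List.mem_filter.1 ((PySem.Set.mem_ofList _ _).1 hs) with ⟨hq, _⟩
    exact ⟨x, hq, ht⟩
  · rintro ⟨t, hq, ht⟩
    refine ⟨t, (PySem.Set.mem_inter _ _ _).2 ⟨(PySem.Set.mem_ofList _ _).2 (List.mem_filter.2 ⟨hq, ?_⟩), ht⟩⟩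
    simp only [decide_eq_true_eq]
    intro h; exact hne (h ▸ ht)

-- A's if-chain, abstracted over its three conditions, equals the table lookup at the matching mask
theorem pv_chain (c1 c2 c3 : Prop) [Decidable c1] [Decidable c2] [Decidable c3] :
    (let f1 : List String := if c1 then ["email"] else []
     let f2 : List String := if c2 then f1 ++ ["phone"] else f1
     if "email" ∉ f2 ∧ c3 then f2 ++ ["address"] else f2)
    = pvFamiliesByMask.getD
        ((cond (decide c1) 1 0) + (cond (decide c2) 2 0) + (cond (decide c3) 4 0)) [] := by
  by_cases a : c1 <;> by_cases b : c2 <;> by_cases c : c3 <;>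
    simp [a, b, c, pvFamiliesByMask]

-- ===== VERDICT (by name: the statement is the Claim_ definition above) =====
theorem query_attribute_families_py_spec : Claim_equal_query_attribute_families_py := by
  intro qs _
  unfold Spec_query_attribute_families_py
  show query_attribute_families_py qs
      = pvFamiliesByMask.getD (qs.foldl (fun m t => m ||| pvBit t) 0) []
  have hE := pv_inter_ne qs pvEmailTokens (by decide)
  have hP := pv_inter_ne qs pvPhoneTokens (by decide)
  have hA := pv_inter_ne qs pvAddressTokens (by decide)
  have hbit : ∀ (i : Nat) (toks : List String),
      (∀ t, (pvBit t).testBit i = decide (t ∈ toks)) →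
      ((qs.foldl (fun m t => m ||| pvBit t) 0).testBit i = true ↔ ∃ t ∈ qs, t ∈ toks) := by
    intro i toks h
    rw [pv_mask_testBit]
    simp [h]
  rw [pv_mask_eq (qs.foldl (fun m t => m ||| pvBit t) 0) (pv_mask_lt qs 0 (by omega))
      (decide (PySem.Set.inter (PySem.Set.ofList (qs.filter (fun t => t ≠ ""))) pvEmailTokens ≠ []))
      (decide (PySem.Set.inter (PySem.Set.ofList (qs.filter (fun t => t ≠ ""))) pvPhoneTokens ≠ []))
      (decide (PySem.Set.inter (PySem.Set.ofList (qs.filter (fun t => t ≠ ""))) pvAddressTokens ≠ []))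
      ((pv_testBit_decide (hbit 0 pvEmailTokens pv_bit_testBit0)).trans (decide_eq_decide.2 hE.symm))
      ((pv_testBit_decide (hbit 1 pvPhoneTokens pv_bit_testBit1)).trans (decide_eq_decide.2 hP.symm))
      ((pv_testBit_decide (hbit 2 pvAddressTokens pv_bit_testBit2)).trans (decide_eq_decide.2 hA.symm))]
  exact pv_chain _ _ _
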